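-- pv_equiv track=rewrite | github.com/JoachimCoenen/Datapack-Editor | model/utils.py | wrapInMarkdownCode
-- ===== SOURCE A (Python) =====
-- def wrapInMarkdownCode(text: str) -> str:
-- 	lenText = len(text)
-- 	needsDouble = False
-- 	if (idx := text.find('`')) >= 0:
-- 		startsWith = idx == 0
-- 		endsWith = text[-1] == '`'
-- 		needsDouble = True
-- 		while (idx := text.find('``', idx)) != -1:
-- 			idx += 2
-- 			if idx >= lenText or text[idx] != '`':
-- 				needsDouble = False
--
-- 		if startsWith:
-- 			text = ' ' + text
-- 		if endsWith:
-- 			text += ' '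
--
-- 	if needsDouble:
-- 		text = f'``{text}``'
-- 	else:
-- 		text = f'`{text}`'
-- 	return text
-- ===== SOURCE B (Python) =====
-- def wrapInMarkdownCode(text: str) -> str:
-- 	# One pass: collect the lengths of the maximal runs of consecutive backticks.
-- 	runs = []
-- 	run = 0
-- 	for c in text:
-- 		if c == '`':
-- 			run += 1
-- 		elif run:
-- 			runs.append(run)
-- 			run = 0
-- 	if run:
-- 		runs.append(run)
-- 	if not runs:
-- 		return f'`{text}`'
-- 	prefix = ' ' if text[0] == '`' else ''
-- 	suffix = ' ' if text[-1] == '`' else ''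
-- 	fence = '``' if all(run % 2 == 1 for run in runs) else '`'
-- 	return f'{fence}{prefix}{text}{suffix}{fence}'
-- ===== Notes on version B (the rewrite author's own statement) =====
-- stated objective: alternative
-- what changed: B makes one pass over the characters collecting the lengths of the maximal backtick runs and double-wraps exactly when at least one run exists and every run has odd length, replacing A's offset-advancing double-backtick find scan that clears needsDouble in place and mutates the string.
import Mathlib
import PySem

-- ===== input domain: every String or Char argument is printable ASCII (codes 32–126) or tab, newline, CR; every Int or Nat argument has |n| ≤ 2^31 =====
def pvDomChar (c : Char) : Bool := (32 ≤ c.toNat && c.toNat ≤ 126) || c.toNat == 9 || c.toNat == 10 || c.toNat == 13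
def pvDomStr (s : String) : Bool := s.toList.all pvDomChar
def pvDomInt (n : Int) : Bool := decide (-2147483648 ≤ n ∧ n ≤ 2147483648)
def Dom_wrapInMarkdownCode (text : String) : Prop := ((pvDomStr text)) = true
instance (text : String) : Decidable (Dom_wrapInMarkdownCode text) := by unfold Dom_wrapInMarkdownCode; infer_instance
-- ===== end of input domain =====

-- B replaces A's offset-advancing double-backtick find scan (which clears needsDouble in place and
-- mutates the string) by one pass collecting the maximal backtick-run lengths: double-wrap
-- exactly when some run exists and every run has odd length. Same cost; objective: alternative.

-- ===== PORT A =====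
-- the 'while (idx := text.find('``', idx)) != -1' loop; fuel = len(text) + 1 bounds the
-- iteration count (idx grows by ≥ 2 each round and stays ≤ len), it never runs out.
def pvALoop (cs : List Char) (idx : Int) (nd : Bool) : Nat → Bool
  | 0 => nd
  | fuel + 1 =>
    let j := PySem.Chars.findFrom cs ['`', '`'] idx none
    if j = -1 then nd
    else -- idx += 2; needsDouble cleared when past the end or the next char is not a backtick
      pvALoop cs (j + 2)
        (if j + 2 ≥ (cs.length : Int) ∨ ¬ (PySem.Chars.pyGet? cs (j + 2) = some '`') then false
         else nd) fuel

def wrapInMarkdownCode (text : String) : String :=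
  let cs := text.toList
  let lenText := cs.length
  let idx := PySem.Chars.find cs ['`']
  let st :=
    if idx ≥ 0 then
      let startsWith := idx = 0
      let endsWith := PySem.Chars.pyGet? cs (-1) = some '`'   -- text[-1]; cs ≠ [] here
      let nd := pvALoop cs idx true (lenText + 1)
      let cs1 := if startsWith then ' ' :: cs else cs
      let cs2 := if endsWith then cs1 ++ [' '] else cs1
      (nd, cs2)
    else (false, cs)
  if st.1 then String.ofList ('`' :: '`' :: st.2 ++ ['`', '`'])
  else String.ofList ('`' :: st.2 ++ ['`'])

-- ===== PORT B =====
-- loop body of Source B's single pass ('for c in text: ...') over the state (runs, run)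
def pvStep (st : List Nat × Nat) (c : Char) : List Nat × Nat :=
  if c = '`' then (st.1, st.2 + 1)
  else if st.2 ≠ 0 then (st.1 ++ [st.2], 0)
  else st

def wrapInMarkdownCode_alt (text : String) : String :=
  let cs := text.toList
  let p := cs.foldl pvStep ([], 0)
  let runs := if p.2 ≠ 0 then p.1 ++ [p.2] else p.1
  if runs = [] then String.ofList ('`' :: cs ++ ['`'])
  else
    let prefix_ := if PySem.Chars.pyGet? cs 0 = some '`' then [' '] else []
    let suffix_ := if PySem.Chars.pyGet? cs (-1) = some '`' then [' '] else []
    let fence := if runs.all (fun r => r % 2 == 1) then ['`', '`'] else ['`']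
    String.ofList (fence ++ prefix_ ++ cs ++ suffix_ ++ fence)

-- ===== PRECONDITION & SPEC =====
def Spec_wrapInMarkdownCode (text : String) (out : String) : Prop := out = wrapInMarkdownCode_alt text
instance (text : String) (out : String) : Decidable (Spec_wrapInMarkdownCode text out) := by unfold Spec_wrapInMarkdownCode; infer_instance

-- ===== CLAIM (what is proved, stated in full; the proofs are below) =====
def Claim_equal_wrapInMarkdownCode : Prop := ∀ (text : String), Dom_wrapInMarkdownCode text → Spec_wrapInMarkdownCode text (wrapInMarkdownCode text)

-- ===== LEMMAS AND PROOFS =====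

-- proof-layer view of B's loop: the list of maximal backtick-run lengths, by run recursion
def pvBLead : List Char → Nat
  | [] => 0
  | c :: t => if c = '`' then pvBLead t + 1 else 0

def pvBRuns (rest : List Char) : List Nat :=
  match rest with
  | [] => []
  | c :: t =>
    let run := pvBLead (c :: t)
    if _h : run ≠ 0 then run :: pvBRuns ((c :: t).drop run)
    else pvBRuns t
termination_by rest.length
decreasing_by
  · simp only [List.length_drop, List.length_cons]
    omega
  · simp

def pvAllOdd (s : List Char) : Bool := (pvBRuns s).all (fun r => r % 2 == 1)

lemma pvBRuns_nil : pvBRuns [] = [] := by rw [pvBRuns]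

lemma pvBLead_cons (c : Char) (t : List Char) :
    pvBLead (c :: t) = if c = '`' then pvBLead t + 1 else 0 := rfl

lemma pvBRuns_cons_ne (c : Char) (t : List Char) (h : c ≠ '`') :
    pvBRuns (c :: t) = pvBRuns t := by
  rw [pvBRuns]
  simp [pvBLead_cons, h]

lemma pvBRuns_cons_tick (t : List Char) :
    pvBRuns ('`' :: t) = (pvBLead t + 1) :: pvBRuns (t.drop (pvBLead t)) := by
  rw [pvBRuns]
  simp [pvBLead_cons]

lemma pvBLead_append_of_lt (p q : List Char) (h : pvBLead p < p.length) :
    pvBLead (p ++ q) = pvBLead p := by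
  induction p with
  | nil => simp at h
  | cons c t ih =>
    rw [List.cons_append, pvBLead_cons, pvBLead_cons]
    by_cases hc : c = '`'
    · rw [if_pos hc, if_pos hc, ih]
      rw [pvBLead_cons, if_pos hc] at h
      simp at h
      omega
    · rw [if_neg hc, if_neg hc]

lemma pvBLead_lt_of_getLast (p : List Char) (hne : p ≠ []) (h : p.getLast? ≠ some '`') :
    pvBLead p < p.length := by
  induction p with
  | nil => exact absurd rfl hne
  | cons c t ih =>
    cases t with
    | nil =>
      have hc : c ≠ '`' := by
        intro hc; exact h (by simp [hc])
      simp [pvBLead_cons, hc]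
    | cons d t' =>
      rw [List.getLast?_cons_cons] at h
      have := ih (by simp) h
      rw [pvBLead_cons]
      simp only [List.length_cons] at this ⊢
      by_cases hc : c = '`'
      · rw [if_pos hc]; omega
      · rw [if_neg hc]; omega

lemma pvBRuns_clean_append (p q : List Char) (h : ∀ c ∈ p, c ≠ '`') :
    pvBRuns (p ++ q) = pvBRuns q := by
  induction p with
  | nil => simp
  | cons c t ih =>
    rw [List.cons_append, pvBRuns_cons_ne c _ (h c (by simp))]
    exact ih (fun c hc => h c (by simp [hc]))

lemma pvBRuns_nil_iff (s : List Char) : pvBRuns s = [] ↔ ∀ c ∈ s, c ≠ '`' := by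
  induction s with
  | nil => simp [pvBRuns_nil]
  | cons c t ih =>
    by_cases hc : c = '`'
    · subst hc
      rw [pvBRuns_cons_tick]
      simp
    · rw [pvBRuns_cons_ne c t hc, ih]
      constructor
      · intro h d hd
        rcases List.mem_cons.mp hd with h1 | h2
        · exact h1 ▸ hc
        · exact h d h2
      · intro h d hd
        exact h d (by simp [hd])

lemma pvAllOdd_noDD (s : List Char) (h : ¬ ['`', '`'] <:+: s) : pvAllOdd s = true := by
  induction s with
  | nil => simp [pvAllOdd, pvBRuns_nil]
  | cons c t ih =>
    have ht : ¬ ['`', '`'] <:+: t := fun hin => h (hin.trans (List.suffix_cons c t).isInfix)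
    by_cases hc : c = '`'
    · subst hc
      have hhd : pvBLead t = 0 := by
        cases t with
        | nil => rfl
        | cons d t' =>
          have hd : d ≠ '`' := by
            intro hd; subst hd
            exact h ⟨[], t', rfl⟩
          simp [pvBLead_cons, hd]
      rw [pvAllOdd, pvBRuns_cons_tick, hhd]
      simp only [List.drop_zero, List.all_cons]
      have := ih ht
      rw [pvAllOdd] at this
      simp [this]
    · rw [pvAllOdd, pvBRuns_cons_ne c t hc, ← pvAllOdd]
      exact ih ht

lemma pvBRuns_append_of_getLast :
    ∀ (n : Nat) (p : List Char), p.length ≤ n → p.getLast? ≠ some '`' →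
      ∀ q : List Char, pvBRuns (p ++ q) = pvBRuns p ++ pvBRuns q := by
  intro n
  induction n with
  | zero =>
    intro p hp _ q
    have : p = [] := List.length_eq_zero_iff.mp (Nat.le_zero.mp hp)
    simp [this, pvBRuns_nil]
  | succ n ih =>
    intro p hp hlast q
    cases p with
    | nil => simp [pvBRuns_nil]
    | cons c t =>
      by_cases hc : c = '`'
      · subst hc
        have hne : ('`' :: t) ≠ ([] : List Char) := by simp
        have hlt : pvBLead ('`' :: t) < ('`' :: t).length := pvBLead_lt_of_getLast _ hne hlast
        rw [pvBLead_cons, if_pos rfl] at hlt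
        simp only [List.length_cons] at hlt
        have hblt : pvBLead t < t.length := by omega
        have htne : t ≠ [] := by
          intro h; subst h; simp [pvBLead] at hblt
        rw [List.cons_append, pvBRuns_cons_tick, pvBRuns_cons_tick,
            pvBLead_append_of_lt t q hblt,
            List.drop_append_of_le_length (Nat.le_of_lt hblt)]
        congr 1
        have hdne : t.drop (pvBLead t) ≠ [] := by
          intro h
          have := congrArg List.length h
          simp at this
          omega
        have hlast' : (t.drop (pvBLead t)).getLast? ≠ some '`' := by
          have h1 : t.getLast? = (t.drop (pvBLead t)).getLast? := by
            conv_lhs => rw [← List.take_append_drop (pvBLead t) t]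
            exact List.getLast?_append_of_ne_nil _ hdne
          have h2 : ('`' :: t).getLast? = t.getLast? := by
            cases t with
            | nil => exact absurd rfl htne
            | cons d t' => exact List.getLast?_cons_cons
          rw [← h1, ← h2]
          exact hlast
        exact ih (t.drop (pvBLead t))
          (by simp only [List.length_drop]; simp only [List.length_cons] at hp; omega) hlast' q
      · rw [List.cons_append, pvBRuns_cons_ne c _ hc, pvBRuns_cons_ne c t hc]
        cases t with
        | nil => simp [pvBRuns_nil]
        | cons d t' =>
          rw [List.getLast?_cons_cons] at hlast
          exact ih (d :: t') (by simp at hp ⊢; omega) hlast q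

lemma pvAllOdd_DD_not (t : List Char) (h : t.head? ≠ some '`') :
    pvAllOdd ('`' :: '`' :: t) = false := by
  have hhd : pvBLead t = 0 := by
    cases t with
    | nil => rfl
    | cons d t' =>
      have hd : d ≠ '`' := by intro hd; exact h (by simp [hd])
      simp [pvBLead_cons, hd]
  rw [pvAllOdd, pvBRuns_cons_tick, pvBLead_cons, if_pos rfl, hhd]
  simp

lemma pvAllOdd_DD_tick (t : List Char) :
    pvAllOdd ('`' :: '`' :: '`' :: t) = pvAllOdd ('`' :: t) := by
  rw [pvAllOdd, pvAllOdd, pvBRuns_cons_tick, pvBRuns_cons_tick]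
  rw [pvBLead_cons, if_pos rfl, pvBLead_cons, if_pos rfl]
  simp only [List.drop_succ_cons, List.all_cons]
  congr 1
  · show ((pvBLead t + 1 + 1 + 1) % 2 == 1) = ((pvBLead t + 1) % 2 == 1)
    have : (pvBLead t + 1 + 1 + 1) % 2 = (pvBLead t + 1) % 2 := by omega
    rw [this]

lemma pvALoop_eq (cs : List Char) :
    ∀ (fuel k : Nat) (nd : Bool), k ≤ cs.length → cs.length + 2 ≤ 2 * fuel + k →
      pvALoop cs (↑k) nd fuel = (nd && pvAllOdd (cs.drop k)) := by
  intro fuel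
  induction fuel with
  | zero => intro k nd hk hfuel; omega
  | succ fuel ih =>
    intro k nd hk hfuel
    rw [pvALoop, PySem.Chars.findFrom_natCast cs ['`', '`'] k hk]
    by_cases hf : PySem.Chars.find (cs.drop k) ['`', '`'] = -1
    · rw [if_pos hf]
      simp only [reduceIte]
      rw [pvAllOdd_noDD _ ((PySem.Chars.find_eq_neg_one_iff _ _).mp hf), Bool.and_true]
    · rw [if_neg hf]
      set f := PySem.Chars.find (cs.drop k) ['`', '`'] with hfdef
      have hf0 : 0 ≤ f := by
        have := PySem.Chars.neg_one_le_find (cs.drop k) ['`', '`']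
        omega
      obtain ⟨hpre, hmin⟩ := PySem.Chars.find_spec (sub := ['`', '`']) hf0
      set m := f.toNat with hmdef
      have hfm : f = (m : Int) := (Int.toNat_of_nonneg hf0).symm
      have hm2 : m + 2 ≤ (cs.drop k).length := by
        have := hpre.length_le
        simp only [List.length_drop, List.length_cons, List.length_nil] at this ⊢
        omega
      have hslen : (cs.drop k).length = cs.length - k := by simp
      have hdropm : (cs.drop k).drop m = '`' :: '`' :: (cs.drop k).drop (m + 2) := by
        obtain ⟨r, hr⟩ := hpre
        have h2 : (cs.drop k).drop (m + 2) = r := by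
          have : ((cs.drop k).drop m).drop 2 = (cs.drop k).drop (m + 2) := List.drop_drop
          rw [← this, ← hr]
          rfl
        rw [← hr, h2]
        rfl
      -- the branch test ↑k + f = -1 is false
      have hne : ¬ ((k : Int) + f = -1) := by omega
      rw [if_neg hne]
      -- rewrite the advanced index as a Nat cast
      have hidx : (k : Int) + f + 2 = ((k + m + 2 : Nat) : Int) := by
        rw [hfm]; push_cast; ring
      rw [hidx]
      have hk2 : k + m + 2 ≤ cs.length := by omega
      -- index lookup = head of the tail
      have hget : PySem.Chars.pyGet? cs ((k + m + 2 : Nat) : Int) = (cs.drop (k + m + 2)).head? := by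
        rw [PySem.Chars.pyGet?_eq_listPyGet?, PySem.List.pyGet?_natCast, List.head?_drop]
      -- the suffix after the matched pair
      have htail : (cs.drop k).drop (m + 2) = cs.drop (k + (m + 2)) := List.drop_drop
      -- split pvAllOdd (cs.drop k) at the first '``' occurrence
      have hsplit : pvAllOdd (cs.drop k) = pvAllOdd ('`' :: '`' :: (cs.drop k).drop (m + 2)) := by
        set s := cs.drop k with hsdef
        have hplen : (s.take m).length = m := by simp; omega
        have hp_no : ¬ ['`', '`'] <:+: s.take m := by
          intro hin
          obtain ⟨l₁, l₂, hl⟩ := hin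
          have hi2 : l₁.length + 2 + l₂.length = m := by
            have := congrArg List.length hl
            simp at this
            omega
          have hpfx : ['`', '`'] <+: (s.take m).drop l₁.length := by
            rw [← hl, List.append_assoc, List.drop_left]
            exact ⟨l₂, rfl⟩
          have hsub : (s.take m).drop l₁.length <+: s.drop l₁.length := by
            rw [List.drop_take]
            exact List.take_prefix _ _
          exact hmin l₁.length (by omega) (hpfx.trans hsub)
        have hp_last : (s.take m).getLast? ≠ some '`' := by
          intro hl
          have hpne : s.take m ≠ [] := by
            intro h; rw [h] at hl; simp at hl
          have hm1 : 1 ≤ m := by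
            rcases Nat.eq_zero_or_pos m with h | h
            · exfalso; apply hpne; simp [h]
            · omega
          have hgl : (s.take m)[m - 1]? = some '`' := by
            rw [← hl, List.getLast?_eq_getElem?, hplen]
          have hsm1 : s[m - 1]? = some '`' := by
            rw [← List.getElem?_take_of_lt (show m - 1 < m by omega), hgl]
          have hlt : m - 1 < s.length := by omega
          have hd1 : s.drop (m - 1) = s[m - 1] :: s.drop (m - 1 + 1) :=
            List.drop_eq_getElem_cons hlt
          have hget1 : s[m - 1] = '`' := by
            have : s[m - 1]? = some s[m - 1] := List.getElem?_eq_getElem hlt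
            rw [this] at hsm1
            exact (Option.some_injective _ hsm1).symm ▸ rfl
          have hm11 : m - 1 + 1 = m := by omega
          have hpfx : ['`', '`'] <+: s.drop (m - 1) := by
            rw [hd1, hget1, hm11, hdropm]
            exact ⟨'`' :: s.drop (m + 2), rfl⟩
          exact hmin (m - 1) (by omega) hpfx
        conv_lhs => rw [show s = s.take m ++ s.drop m from (List.take_append_drop m s).symm]
        rw [pvAllOdd, pvBRuns_append_of_getLast (s.take m).length (s.take m) le_rfl hp_last,
            List.all_append]
        have hptrue : pvAllOdd (s.take m) = true := pvAllOdd_noDD _ hp_no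
        rw [pvAllOdd] at hptrue
        rw [hptrue, Bool.true_and, hdropm, ← pvAllOdd]
      -- case on the character after the matched pair
      cases ht : (cs.drop k).drop (m + 2) with
      | nil =>
        have hlen0 : k + (m + 2) = cs.length ∨ cs.length ≤ k + (m + 2) := by
          right
          have := congrArg List.length (htail ▸ ht)
          simp at this
          omega
        have hge : ((k + m + 2 : Nat) : Int) ≥ (cs.length : Int) := by
          rcases hlen0 with h | h <;> [omega; omega]
        rw [if_pos (Or.inl hge)]
        rw [ih (k + m + 2) false (by omega) (by omega)]
        rw [hsplit, ht, pvAllOdd_DD_not [] (by simp)]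
        simp
      | cons d t'' =>
        have hlen1 : k + m + 2 < cs.length := by
          have := congrArg List.length (htail ▸ ht)
          simp at this
          omega
        have hnge : ¬ (((k + m + 2 : Nat) : Int) ≥ (cs.length : Int)) := by omega
        have hhead : PySem.Chars.pyGet? cs ((k + m + 2 : Nat) : Int) = some d := by
          rw [hget, show k + m + 2 = k + (m + 2) by omega, ← htail, ht]
          rfl
        by_cases hd : d = '`'
        · subst hd
          rw [if_neg (not_or.mpr ⟨hnge, not_not.mpr hhead⟩)]
          rw [ih (k + m + 2) nd (by omega) (by omega)]
          rw [hsplit, ht, pvAllOdd_DD_tick]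
          rw [show k + m + 2 = k + (m + 2) by omega, ← htail, ht]
        · rw [if_pos (Or.inr (by rw [hhead]; simp [hd]))]
          rw [ih (k + m + 2) false (by omega) (by omega)]
          rw [hsplit, ht, pvAllOdd_DD_not (d :: t'') (by simp [hd])]
          simp


lemma pvBLead_replicate_append (n : Nat) (t : List Char) :
    pvBLead (List.replicate n '`' ++ t) = n + pvBLead t := by
  induction n with
  | zero => simp
  | succ n ih =>
    rw [List.replicate_succ, List.cons_append, pvBLead_cons, if_pos rfl, ih]
    omega

lemma pvBRuns_replicate_cons (n : Nat) (hn : n ≠ 0) (c : Char) (hc : c ≠ '`') (t : List Char) :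
    pvBRuns (List.replicate n '`' ++ c :: t) = n :: pvBRuns t := by
  obtain ⟨m, rfl⟩ : ∃ m, n = m + 1 := ⟨n - 1, by omega⟩
  rw [List.replicate_succ, List.cons_append, pvBRuns_cons_tick,
      pvBLead_replicate_append m (c :: t), pvBLead_cons, if_neg hc]
  have hdrop : (List.replicate m '`' ++ c :: t).drop (m + 0) = c :: t := by simp
  rw [hdrop, pvBRuns_cons_ne c t hc]

lemma pvBRuns_replicate (n : Nat) (hn : n ≠ 0) :
    pvBRuns (List.replicate n '`') = [n] := by
  obtain ⟨m, rfl⟩ : ∃ m, n = m + 1 := ⟨n - 1, by omega⟩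
  have hb : pvBLead (List.replicate m '`') = m := by
    have := pvBLead_replicate_append m []
    simpa using this
  rw [List.replicate_succ, pvBRuns_cons_tick, hb]
  have hdrop : (List.replicate m '`').drop m = [] := by simp
  rw [hdrop, pvBRuns_nil]

lemma pvFoldl_runs (cs : List Char) :
    ∀ (rs : List Nat) (run : Nat),
      (if (cs.foldl pvStep (rs, run)).2 ≠ 0
       then (cs.foldl pvStep (rs, run)).1 ++ [(cs.foldl pvStep (rs, run)).2]
       else (cs.foldl pvStep (rs, run)).1)
        = rs ++ pvBRuns (List.replicate run '`' ++ cs) := by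
  induction cs with
  | nil =>
    intro rs run
    by_cases hr : run = 0
    · simp [hr, pvBRuns_nil]
    · simp only [List.foldl_nil, List.append_nil]
      rw [if_pos hr, pvBRuns_replicate run hr]
  | cons c t ih =>
    intro rs run
    by_cases hc : c = '`'
    · subst hc
      rw [List.foldl_cons, show pvStep (rs, run) '`' = (rs, run + 1) from by simp [pvStep], ih,
          show List.replicate run '`' ++ '`' :: t = List.replicate (run + 1) '`' ++ t from by
            simp [List.replicate_succ']]
    · by_cases hr : run = 0
      · subst hr
        rw [List.foldl_cons, show pvStep (rs, 0) c = (rs, 0) from by simp [pvStep, hc], ih]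
        simp [pvBRuns_cons_ne c t hc]
      · rw [List.foldl_cons, show pvStep (rs, run) c = (rs ++ [run], 0) from by
              simp [pvStep, hc, hr],
            ih, pvBRuns_replicate_cons run hr c hc t]
        simp

-- ===== VERDICT (by name: the statement is the Claim_ definition above) =====
theorem wrapInMarkdownCode_spec : Claim_equal_wrapInMarkdownCode := by
  intro text _
  unfold Spec_wrapInMarkdownCode
  simp only [wrapInMarkdownCode, wrapInMarkdownCode_alt]
  set cs := text.toList with hcs
  have hfold : (if (cs.foldl pvStep ([], 0)).2 ≠ 0
       then (cs.foldl pvStep ([], 0)).1 ++ [(cs.foldl pvStep ([], 0)).2]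
       else (cs.foldl pvStep ([], 0)).1) = pvBRuns cs := by
    have := pvFoldl_runs cs [] 0
    simpa using this
  rw [hfold]
  by_cases hpos : PySem.Chars.find cs ['`'] ≥ 0
  case neg =>
    have hneg : PySem.Chars.find cs ['`'] = -1 := by
      have := PySem.Chars.neg_one_le_find cs ['`']
      omega
    have hno : ¬ ['`'] <:+: cs := (PySem.Chars.find_eq_neg_one_iff _ _).mp hneg
    have hmem : ∀ c ∈ cs, c ≠ '`' := by
      intro c hc hcq
      subst hcq
      exact hno ((List.singleton_infix_iff '`' cs).mpr hc)
    have hnil : pvBRuns cs = [] := (pvBRuns_nil_iff cs).mpr hmem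
    rw [if_neg hpos, if_pos hnil]
    simp
  case pos =>
    obtain ⟨hpre0, hmin0⟩ := PySem.Chars.find_spec (sub := ['`']) hpos
    set f := PySem.Chars.find cs ['`'] with hfdef
    set m0 := f.toNat with hm0
    have hfm : f = (m0 : Int) := (Int.toNat_of_nonneg hpos).symm
    have hm0le : m0 ≤ cs.length := by
      have := PySem.Chars.find_le_length cs ['`']
      omega
    have htick : '`' ∈ cs := by
      obtain ⟨r, hr⟩ := hpre0
      exact List.drop_subset m0 cs (by rw [← hr]; simp)
    have hrne : ¬ pvBRuns cs = [] := fun h => (pvBRuns_nil_iff cs).mp h '`' htick rfl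
    have hclean : pvBRuns cs = pvBRuns (cs.drop m0) := by
      conv_lhs => rw [← List.take_append_drop m0 cs]
      apply pvBRuns_clean_append
      intro c hc hcq
      subst hcq
      obtain ⟨i, hi, hgi⟩ := List.mem_iff_getElem.mp hc
      have hilt : i < m0 := by
        have h2 := hi
        simp only [List.length_take] at h2
        omega
      have hics : cs[i]? = some '`' := by
        rw [← List.getElem?_take_of_lt hilt]
        exact hgi ▸ List.getElem?_eq_getElem hi
      have hdropi : ['`'] <+: cs.drop i := by
        rw [List.drop_eq_getElem_cons (show i < cs.length by omega)]
        have : cs[i] = '`' := by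
          have h2 : cs[i]? = some cs[i] := List.getElem?_eq_getElem (by omega)
          rw [h2] at hics
          exact Option.some_injective _ hics
        rw [this]
        exact ⟨_, rfl⟩
      exact hmin0 i hilt hdropi
    have hnd : pvALoop cs f true (cs.length + 1) = pvAllOdd (cs.drop m0) := by
      rw [hfm, pvALoop_eq cs (cs.length + 1) m0 true hm0le (by omega), Bool.true_and]
    have h00 : PySem.List.pyGet? cs 0 = cs[0]? := by
      rw [show (0 : Int) = ((0 : Nat) : Int) from rfl, PySem.List.pyGet?_natCast]
    have hstart : (PySem.List.pyGet? cs 0 = some '`') ↔ f = 0 := by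
      constructor
      · intro h
        rw [h00] at h
        obtain ⟨h0lt, hceq⟩ := List.getElem?_eq_some_iff.mp h
        have hdrop0 : ['`'] <+: cs.drop 0 := by
          rw [List.drop_eq_getElem_cons h0lt, hceq]
          exact ⟨_, rfl⟩
        by_contra hne0
        have hm0pos : 0 < m0 := by omega
        exact hmin0 0 hm0pos hdrop0
      · intro h
        have : m0 = 0 := by omega
        rw [this] at hpre0
        obtain ⟨r, hr⟩ := hpre0
        rw [List.drop_zero] at hr
        rw [h00, ← hr]
        rfl
    rw [if_pos hpos, if_neg hrne, hnd, pvAllOdd, ← hclean]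
    by_cases hs : f = 0 <;> by_cases hend : PySem.List.pyGet? cs (-1) = some '`' <;>
      cases hall : (pvBRuns cs).all (fun r => r % 2 == 1) <;>
        simp [hstart, hs, hend, hall, List.append_assoc]
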